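-- pv_equiv track=rewrite | github.com/rahulkaushal04/now-boarding-scheduler | data/processor.py | build_conflict_matrix
-- ===== SOURCE A (Python) =====
-- def build_conflict_matrix(
--     demand_matrix: dict[str, set[str]],
-- ) -> dict[tuple[str, str], int]:
--     """Compute shared-player counts between all game pairs.
--
--     Only pairs with at least one shared player are stored. Both orderings
--     of each pair are inserted so lookups can use either key order.
--
--     Args:
--         demand_matrix (dict[str, set[str]]): Mapping of game id to interested
--             player ids.
--
--     Returns:
--         dict[tuple[str, str], int]: Mapping of ``(game_a, game_b)`` to the
--             number of players interested in both games.
--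
--     Example:
--         >>> dm = {"A": {"Alice", "Bob"}, "B": {"Bob", "Carol"}}
--         >>> build_conflict_matrix(dm)[("A", "B")]
--         1
--     """
--     conflicts: dict[tuple[str, str], int] = {}
--     game_ids = list(demand_matrix)
--
--     for i, g1 in enumerate(game_ids):
--         for g2 in game_ids[i + 1 :]:
--             shared = len(demand_matrix[g1] & demand_matrix[g2])
--             if shared:
--                 conflicts[(g1, g2)] = shared
--                 conflicts[(g2, g1)] = shared
--
--     return conflicts
-- ===== SOURCE B (Python) =====
-- def build_conflict_matrix(
--     demand_matrix: dict[str, set[str]],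
-- ) -> dict[tuple[str, str], int]:
--     """Inverted-index re-implementation: invert to player -> games, count each
--     co-occurring game pair once per shared player, then emit the pairs in the
--     original pairwise order (by game position)."""
--     player_games: dict[str, list[str]] = {}
--     for game, players in demand_matrix.items():
--         for p in players:
--             player_games.setdefault(p, []).append(game)
--
--     counts: dict[tuple[str, str], int] = {}
--     for games in player_games.values():
--         for i, g1 in enumerate(games):
--             for g2 in games[i + 1 :]:
--                 counts[(g1, g2)] = counts.get((g1, g2), 0) + 1
--
--     pos = {g: i for i, g in enumerate(demand_matrix)}
--     n = len(pos)
--     conflicts: dict[tuple[str, str], int] = {}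
--     for g1, g2 in sorted(counts, key=lambda k: pos[k[0]] * n + pos[k[1]]):
--         c = counts[(g1, g2)]
--         conflicts[(g1, g2)] = c
--         conflicts[(g2, g1)] = c
--     return conflicts
-- ===== Notes on version B (the rewrite author's own statement) =====
-- stated objective: faster
-- what changed: A intersects the player sets of every game pair (O(G^2) intersections); B builds an inverted index player->games once, increments a counter for each game pair co-occurring in a player's list, and emits the counted pairs in A's pair order.
import Mathlib
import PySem

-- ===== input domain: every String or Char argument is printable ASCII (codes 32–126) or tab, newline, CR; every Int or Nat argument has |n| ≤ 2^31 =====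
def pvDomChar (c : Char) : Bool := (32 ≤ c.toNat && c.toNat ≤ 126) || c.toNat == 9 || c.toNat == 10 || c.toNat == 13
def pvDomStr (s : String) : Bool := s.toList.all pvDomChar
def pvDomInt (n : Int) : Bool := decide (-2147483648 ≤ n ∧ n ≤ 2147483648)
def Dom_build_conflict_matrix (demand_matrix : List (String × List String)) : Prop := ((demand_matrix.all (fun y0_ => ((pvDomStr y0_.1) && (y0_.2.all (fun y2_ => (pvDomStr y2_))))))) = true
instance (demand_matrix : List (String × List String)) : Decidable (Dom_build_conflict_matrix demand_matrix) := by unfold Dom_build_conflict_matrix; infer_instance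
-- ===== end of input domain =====

-- B replaces A's pairwise set intersections by an inverted index (player → games):
-- each shared player increments its game-pair counters once, and the counted pairs
-- are then emitted in A's pair order (sorted by game position).

-- ===== PORT A =====
def build_conflict_matrix (demand_matrix : List (String × List String)) : List (String × String × Int) :=
  let d := PySem.Dict.mk demand_matrix
  let game_ids := PySem.Dict.keys d
  let conflicts : PySem.Dict (String × String) Int :=
    (PySem.List.enumerate game_ids).foldl (fun conflicts ig =>
      (PySem.List.slice game_ids (some (ig.1 + 1)) none).foldl (fun conflicts g2 =>
        let shared : Int := PySem.Set.len (PySem.Set.inter (d.getD ig.2 []) (d.getD g2 []))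
        if shared ≠ 0 then
          (conflicts.insert (ig.2, g2) shared).insert (g2, ig.2) shared
        else conflicts) conflicts) PySem.Dict.empty
  conflicts.items.map (fun p => (p.1.1, p.1.2, p.2))

-- ===== PORT B =====
def build_conflict_matrix_alt (demand_matrix : List (String × List String)) : List (String × String × Int) :=
  let player_games : PySem.Dict String (List String) :=
    demand_matrix.foldl (fun pg gp =>
      gp.2.foldl (fun pg p => pg.modify p [] (fun gs => gs ++ [gp.1])) pg) PySem.Dict.empty
  let counts : PySem.Dict (String × String) Int :=
    (PySem.Dict.values player_games).foldl (fun c games =>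
      (PySem.List.enumerate games).foldl (fun c ig =>
        (PySem.List.slice games (some (ig.1 + 1)) none).foldl (fun c g2 =>
          c.insert (ig.2, g2) (c.getD (ig.2, g2) 0 + 1)) c) c) PySem.Dict.empty
  let pos : PySem.Dict String Int :=
    (PySem.List.enumerate (demand_matrix.map (·.1))).foldl (fun d ig => d.insert ig.2 ig.1) PySem.Dict.empty
  let n : Int := (PySem.Dict.size pos : Int)
  let sortedKeys := PySem.List.sorted (PySem.Dict.keys counts) (fun k => pos.getD k.1 0 * n + pos.getD k.2 0)
  let conflicts : PySem.Dict (String × String) Int :=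
    sortedKeys.foldl (fun conf k =>
      let c := counts.getD k 0
      (conf.insert k c).insert (k.2, k.1) c) PySem.Dict.empty
  conflicts.items.map (fun p => (p.1.1, p.1.2, p.2))

-- ===== PRECONDITION & SPEC =====
-- Pre_ excludes association lists with duplicate game keys or duplicate players inside
-- a value list: those do not represent any Python dict[str, set[str]] input of A.
def Pre_build_conflict_matrix (demand_matrix : List (String × List String)) : Prop :=
  (demand_matrix.map (·.1)).Nodup ∧ ∀ gp ∈ demand_matrix, gp.2.Nodup
instance (demand_matrix : List (String × List String)) : Decidable (Pre_build_conflict_matrix demand_matrix) := by unfold Pre_build_conflict_matrix; infer_instance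
def pvWitness_build_conflict_matrix : (List (String × List String)) :=
  [("A", ["Alice", "Bob"]), ("B", ["Bob", "Carol"]), ("C", [])]
def Spec_build_conflict_matrix (demand_matrix : List (String × List String)) (out : List (String × String × Int)) : Prop := out = build_conflict_matrix_alt demand_matrix
instance (demand_matrix : List (String × List String)) (out : List (String × String × Int)) : Decidable (Spec_build_conflict_matrix demand_matrix out) := by unfold Spec_build_conflict_matrix; infer_instance

-- ===== CLAIM (what is proved, stated in full; the proofs are below) =====
def Claim_equal_build_conflict_matrix : Prop := ∀ (demand_matrix : List (String × List String)), Dom_build_conflict_matrix demand_matrix → Pre_build_conflict_matrix demand_matrix → Spec_build_conflict_matrix demand_matrix (build_conflict_matrix demand_matrix)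

-- ===== LEMMAS AND PROOFS =====

def pvKeysL (dm : List (String × List String)) : List String := dm.map (·.1)
def pvS (dm : List (String × List String)) (g : String) : List String := (PySem.Dict.mk dm).getD g []
def pvShared (dm : List (String × List String)) (k : String × String) : Int :=
  PySem.Set.len (PySem.Set.inter (pvS dm k.1) (pvS dm k.2))
-- all ordered pairs (earlier, later) of a list, in A's loop order
def pvOrdPairs : List String → List (String × String)
  | [] => []
  | x :: t => t.map (fun y => (x, y)) ++ pvOrdPairs t
-- (player, game) incidence pairs, the player set, a player's game list
def pvPL (dm : List (String × List String)) : List (String × String) :=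
  dm.flatMap (fun gp => gp.2.map (fun p => (p, gp.1)))
def pvPlayers (dm : List (String × List String)) : List String := PySem.Set.ofList ((pvPL dm).map (·.1))
def pvGames (dm : List (String × List String)) (p : String) : List String :=
  ((pvPL dm).filter (fun q => q.1 == p)).map (·.2)
-- the flattened co-occurrence pair list B counts
def pvL (dm : List (String × List String)) : List (String × String) :=
  (pvPlayers dm).flatMap (fun p => pvOrdPairs (pvGames dm p))
-- the two emit steps
def pvEmit2 (dm : List (String × List String)) (conf : PySem.Dict (String × String) Int) (k : String × String) : PySem.Dict (String × String) Int :=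
  (conf.insert k (pvShared dm k)).insert (k.2, k.1) (pvShared dm k)
def pvEmitA (dm : List (String × List String)) (conf : PySem.Dict (String × String) Int) (k : String × String) : PySem.Dict (String × String) Int :=
  if pvShared dm k ≠ 0 then pvEmit2 dm conf k else conf
-- the pairs A keeps, in A's order
def pvYs (dm : List (String × List String)) : List (String × String) :=
  (pvOrdPairs (pvKeysL dm)).filter (fun k => decide (pvShared dm k ≠ 0))


theorem pvPairFoldGen {β : Type} (f : β → String × String → β) :
    ∀ (l pre : List String) (init : β),
    (PySem.List.enumerate l (pre.length : Int)).foldl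
      (fun acc ig => (PySem.List.slice (pre ++ l) (some (ig.1 + 1)) none).foldl (fun acc y => f acc (ig.2, y)) acc) init
    = (pvOrdPairs l).foldl f init
  | [], pre, init => by simp [PySem.List.enumerate, pvOrdPairs]
  | x :: t, pre, init => by
      rw [PySem.List.enumerate_cons, List.foldl_cons]
      have hslice : PySem.List.slice (pre ++ x :: t) (some ((pre.length : Int) + 1)) none = t := by
        have h1 : ((pre.length : Int) + 1) = ((pre.length + 1 : Nat) : Int) := by push_cast; ring
        rw [h1, PySem.List.slice_from_natCast, List.append_cons,
          show pre.length + 1 = (pre ++ [x]).length by simp, List.drop_left]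
      rw [hslice]
      have hlen : (pre.length : Int) + 1 = (((pre ++ [x]).length : Nat) : Int) := by simp
      rw [hlen, show pre ++ x :: t = (pre ++ [x]) ++ t from by simp]
      rw [pvPairFoldGen f t (pre ++ [x])]
      rw [show (t.foldl (fun acc y => f acc (x, y)) init) = ((t.map (fun y => (x, y))).foldl f init) from (List.foldl_map ..).symm]
      simp [pvOrdPairs, List.foldl_append]

theorem pvPairFold0 {β : Type} (f : β → String × String → β) (l : List String) (init : β) :
    (PySem.List.enumerate l).foldl
      (fun acc ig => (PySem.List.slice l (some (ig.1 + 1)) none).foldl (fun acc y => f acc (ig.2, y)) acc) init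
    = (pvOrdPairs l).foldl f init := by
  have h := pvPairFoldGen f l [] init
  simpa using h

theorem pvFoldlFoldlFlatMap {α β γ : Type} (g : α → List β) (step : γ → β → γ) :
    ∀ (l : List α) (init : γ),
    l.foldl (fun c x => (g x).foldl step c) init = (l.flatMap g).foldl step init
  | [], init => rfl
  | x :: t, init => by
      simp only [List.foldl_cons, List.flatMap_cons, List.foldl_append]
      exact pvFoldlFoldlFlatMap g step t _

theorem pvPortA_eq (dm : List (String × List String)) :
    build_conflict_matrix dm
    = ((pvYs dm).foldl (pvEmit2 dm) PySem.Dict.empty).items.map (fun p => (p.1.1, p.1.2, p.2)) := by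
  show (((PySem.List.enumerate (pvKeysL dm)).foldl
      (fun acc ig => (PySem.List.slice (pvKeysL dm) (some (ig.1 + 1)) none).foldl
        (fun acc y => pvEmitA dm acc (ig.2, y)) acc) PySem.Dict.empty).items.map (fun p => (p.1.1, p.1.2, p.2))) = _
  rw [pvPairFold0]
  unfold pvEmitA pvYs
  rw [PySem.List.foldl_ite_eq_foldl_filter (p := fun k => pvShared dm k ≠ 0) (f := pvEmit2 dm)]
theorem pvGetD_empty {κ ν : Type} [BEq κ] (k : κ) (d0 : ν) : (PySem.Dict.empty : PySem.Dict κ ν).getD k d0 = d0 := rfl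

theorem pvPG_values (dm : List (String × List String)) :
    PySem.Dict.values (dm.foldl (fun pg gp =>
      gp.2.foldl (fun pg p => pg.modify p [] (fun gs => gs ++ [gp.1])) pg) PySem.Dict.empty)
    = (pvPlayers dm).map (pvGames dm) := by
  have hflat : (dm.foldl (fun pg gp =>
      gp.2.foldl (fun pg p => pg.modify p [] (fun gs => gs ++ [gp.1])) pg) (PySem.Dict.empty : PySem.Dict String (List String)))
      = (pvPL dm).foldl (fun d q => d.modify q.1 [] (fun gs => gs ++ [q.2])) PySem.Dict.empty := by
    unfold pvPL
    rw [← pvFoldlFoldlFlatMap]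
    apply PySem.List.foldl_congr_mem
    intro acc gp _
    rw [List.foldl_map]
  rw [hflat]
  have hkeys : ((pvPL dm).foldl (fun d q => d.modify q.1 [] (fun gs => gs ++ [q.2])) (PySem.Dict.empty : PySem.Dict String (List String))).keys
      = pvPlayers dm := by
    rw [PySem.Dict.keys_foldl_modify_key (pvPL dm) (fun q => q.1) [] (fun _ q => (fun gs => gs ++ [q.2]))]
    show PySem.Set.update [] _ = _
    rw [PySem.Set.update_nil_left]
    rfl
  have hnd : ((pvPL dm).foldl (fun d q => d.modify q.1 [] (fun gs => gs ++ [q.2])) (PySem.Dict.empty : PySem.Dict String (List String))).keys.Nodup := by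
    rw [hkeys]; exact PySem.Set.nodup_ofList _
  rw [PySem.Dict.values_eq_map_keys _ hnd [], hkeys]
  apply List.map_congr_left
  intro p _
  rw [PySem.Dict.getD_foldl_modify_append, pvGetD_empty]
  rfl

theorem pvCounts_eq (dm : List (String × List String)) :
    ((pvPlayers dm).map (pvGames dm)).foldl (fun c games =>
      (PySem.List.enumerate games).foldl (fun c ig =>
        (PySem.List.slice games (some (ig.1 + 1)) none).foldl (fun c g2 =>
          c.insert (ig.2, g2) (c.getD (ig.2, g2) 0 + 1)) c) c) (PySem.Dict.empty : PySem.Dict (String × String) Int)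
    = PySem.Dict.counter (pvL dm) := by
  have h1 : ∀ (c : PySem.Dict (String × String) Int) (games : List String),
      (PySem.List.enumerate games).foldl (fun c ig =>
        (PySem.List.slice games (some (ig.1 + 1)) none).foldl (fun c g2 =>
          c.insert (ig.2, g2) (c.getD (ig.2, g2) 0 + 1)) c) c
      = (pvOrdPairs games).foldl (fun c k => c.insert k (c.getD k 0 + 1)) c := by
    intro c games
    exact pvPairFold0 (fun c k => c.insert k (c.getD k 0 + 1)) games c
  calc ((pvPlayers dm).map (pvGames dm)).foldl (fun c games =>
      (PySem.List.enumerate games).foldl (fun c ig =>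
        (PySem.List.slice games (some (ig.1 + 1)) none).foldl (fun c g2 =>
          c.insert (ig.2, g2) (c.getD (ig.2, g2) 0 + 1)) c) c) (PySem.Dict.empty : PySem.Dict (String × String) Int)
      = ((pvPlayers dm).map (pvGames dm)).foldl (fun c games =>
          (pvOrdPairs games).foldl (fun c k => c.insert k (c.getD k 0 + 1)) c) PySem.Dict.empty := by
        apply PySem.List.foldl_congr_mem; intro acc games _; exact h1 acc games
    _ = (pvPlayers dm).foldl (fun c p =>
          (pvOrdPairs (pvGames dm p)).foldl (fun c k => c.insert k (c.getD k 0 + 1)) c) PySem.Dict.empty := by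
        rw [List.foldl_map]
    _ = (pvL dm).foldl (fun c k => c.insert k (c.getD k 0 + 1)) PySem.Dict.empty := by
        rw [pvFoldlFoldlFlatMap]; rfl
    _ = PySem.Dict.counter (pvL dm) := PySem.Dict.foldl_insert_getD_add_one_eq_counter _
theorem pvPos_getD (g : String) :
    ∀ (l : List String) (s : Int) (d : PySem.Dict String Int), l.Nodup →
    ((PySem.List.enumerate l s).foldl (fun d ig => d.insert ig.2 ig.1) d).getD g 0
    = if g ∈ l then s + (l.idxOf g : Int) else d.getD g 0
  | [], s, d, _ => by simp [PySem.List.enumerate]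
  | x :: t, s, d, h => by
    rw [PySem.List.enumerate_cons, List.foldl_cons]
    rw [pvPos_getD g t (s + 1) (d.insert x s) (List.nodup_cons.mp h).2]
    by_cases hx : g = x
    · subst hx
      have hnt : g ∉ t := (List.nodup_cons.mp h).1
      simp [hnt, PySem.Dict.getD_insert_self]
    · by_cases ht : g ∈ t
      · simp only [ht, if_true, List.mem_cons, or_true]
        rw [List.idxOf_cons_ne _ (by exact fun hh => hx (by simpa using hh.symm))]
        push_cast; ring
      · have : g ∉ x :: t := by simp [hx, ht]
        simp only [ht, if_false, this, if_false]
        rw [PySem.Dict.getD_insert_of_ne]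
        exact fun hh => hx (by simpa using hh)
theorem pvPos_size (dm : List (String × List String)) (h : (pvKeysL dm).Nodup) :
    ((PySem.List.enumerate (dm.map (·.1))).foldl (fun d ig => d.insert ig.2 ig.1)
      (PySem.Dict.empty : PySem.Dict String Int)).size = (pvKeysL dm).length := by
  have hkeys : ((PySem.List.enumerate (dm.map (·.1))).foldl (fun d ig => d.insert ig.2 ig.1)
      (PySem.Dict.empty : PySem.Dict String Int)).keys
      = pvKeysL dm := by
    rw [PySem.Dict.keys_foldl_insert_key (PySem.List.enumerate (dm.map (·.1))) (fun ig => ig.2) (fun _ ig => ig.1)]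
    show PySem.Set.update [] _ = _
    rw [PySem.Set.update_nil_left, PySem.List.map_snd_enumerate]
    exact PySem.Set.ofList_eq_self_of_nodup _ h
  have : ∀ (d : PySem.Dict String Int), d.size = d.keys.length := by
    intro d; simp [PySem.Dict.size, PySem.Dict.keys]
  rw [this, hkeys]

theorem pvOrdPairs_mem {k : String × String} : ∀ {l : List String}, k ∈ pvOrdPairs l → k.1 ∈ l ∧ k.2 ∈ l
  | [], h => by simp [pvOrdPairs] at h
  | x :: t, h => by
    simp only [pvOrdPairs, List.mem_append, List.mem_map] at h
    rcases h with ⟨y, hy, hk⟩ | h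
    · subst hk; exact ⟨by simp, by simp [hy]⟩
    · have := pvOrdPairs_mem h
      exact ⟨List.mem_cons_of_mem _ this.1, List.mem_cons_of_mem _ this.2⟩

theorem pvOrdPairs_nodup : ∀ {l : List String}, l.Nodup → (pvOrdPairs l).Nodup
  | [], _ => by simp [pvOrdPairs]
  | x :: t, h => by
    obtain ⟨hx, ht⟩ := List.nodup_cons.mp h
    rw [pvOrdPairs, List.nodup_append]
    refine ⟨ht.map (fun hab => by simpa using hab), pvOrdPairs_nodup ht, ?_⟩
    intro a ha b hb
    simp only [List.mem_map] at ha
    obtain ⟨y, _, hk⟩ := ha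
    have hb1 := (pvOrdPairs_mem hb).1
    intro hab
    subst hab
    rw [← hk] at hb1
    exact hx hb1
theorem pvOrdPairs_sublist_iff {k : String × String} :
    ∀ {s l : List String}, s.Sublist l → l.Nodup →
    (k ∈ pvOrdPairs s ↔ k ∈ pvOrdPairs l ∧ k.1 ∈ s ∧ k.2 ∈ s) := by
  intro s l h
  induction h with
  | slnil => simp [pvOrdPairs]
  | @cons s t x h ih =>
    intro hn
    obtain ⟨hx, ht⟩ := List.nodup_cons.mp hn
    rw [ih ht]
    constructor
    · rintro ⟨hl, h1, h2⟩
      exact ⟨by simp [pvOrdPairs, hl], h1, h2⟩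
    · rintro ⟨hl, h1, h2⟩
      simp only [pvOrdPairs, List.mem_append, List.mem_map] at hl
      rcases hl with ⟨y, hy, hk⟩ | hl
      · exfalso
        have : k.1 = x := by rw [← hk]
        exact hx (this ▸ h.subset h1)
      · exact ⟨hl, h1, h2⟩
  | @cons₂ s t x h ih =>
    intro hn
    obtain ⟨hx, ht⟩ := List.nodup_cons.mp hn
    simp only [pvOrdPairs, List.mem_append, List.mem_map]
    constructor
    · rintro (⟨y, hy, hk⟩ | hs)
      · subst hk
        exact ⟨Or.inl ⟨y, h.subset hy, rfl⟩, by simp, by simp [hy]⟩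
      · have := (ih ht).mp hs
        obtain ⟨hl, h1, h2⟩ := this
        exact ⟨Or.inr hl, List.mem_cons_of_mem _ h1, List.mem_cons_of_mem _ h2⟩
    · rintro ⟨⟨y, hy, hk⟩ | hl, h1, h2⟩
      · subst hk
        left
        refine ⟨y, ?_, rfl⟩
        rcases List.mem_cons.mp h2 with h2 | h2
        · exact absurd (h2 ▸ hy) hx
        · exact h2
      · right
        have hk1 : k.1 ∈ t := (pvOrdPairs_mem hl).1
        have hk2 : k.2 ∈ t := (pvOrdPairs_mem hl).2
        rw [ih ht]
        refine ⟨hl, ?_, ?_⟩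
        · rcases List.mem_cons.mp h1 with e | e
          · exact absurd (e ▸ hk1) hx
          · exact e
        · rcases List.mem_cons.mp h2 with e | e
          · exact absurd (e ▸ hk2) hx
          · exact e

theorem pvNodup_pairwise_idxOf : ∀ (l : List String), l.Nodup →
    l.Pairwise (fun a b => l.idxOf a < l.idxOf b)
  | [], _ => by simp
  | x :: t, h => by
    obtain ⟨hx, ht⟩ := List.nodup_cons.mp h
    rw [List.pairwise_cons]
    constructor
    · intro b hb
      rw [List.idxOf_cons_self, List.idxOf_cons_ne _ (fun e => hx (by rw [e]; exact hb))]
      omega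
    · have := pvNodup_pairwise_idxOf t ht
      apply this.imp_of_mem
      intro a b ha hb hab
      rw [List.idxOf_cons_ne _ (fun e => hx (by rw [e]; exact ha)),
          List.idxOf_cons_ne _ (fun e => hx (by rw [e]; exact hb))]
      omega
theorem pvOrdPairs_pairwise : ∀ (l : List String), l.Nodup → ∀ n : Int, (l.length : Int) ≤ n →
    (pvOrdPairs l).Pairwise (fun k k' =>
      (l.idxOf k.1 : Int) * n + (l.idxOf k.2 : Int) < (l.idxOf k'.1 : Int) * n + (l.idxOf k'.2 : Int))
  | [], _, n, _ => by simp [pvOrdPairs]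
  | x :: t, h, n, hn => by
    obtain ⟨hx, ht⟩ := List.nodup_cons.mp h
    have hne : ∀ {a : String}, a ∈ t → x ≠ a := fun {a} ha e => hx (by rw [e]; exact ha)
    have hidx : ∀ {a : String}, a ∈ t → (x :: t).idxOf a = t.idxOf a + 1 := by
      intro a ha
      rw [List.idxOf_cons_ne _ (hne ha)]
    have hlen : (t.length : Int) + 1 ≤ n := by
      simpa using hn
    rw [pvOrdPairs, List.pairwise_append]
    refine ⟨?_, ?_, ?_⟩
    · -- within the (x, ·) block: ranks are idxOf of the second component
      rw [List.pairwise_map]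
      have := pvNodup_pairwise_idxOf t ht
      apply this.imp_of_mem
      intro a b ha hb hab
      simp only [List.idxOf_cons_self, hidx ha, hidx hb]
      push_cast
      omega
    · -- within pvOrdPairs t: all indices shift by one, rank shifts by n + 1
      have := pvOrdPairs_pairwise t ht n (by omega)
      apply this.imp_of_mem
      intro a b ha hb hab
      have a1 := (pvOrdPairs_mem ha).1
      have a2 := (pvOrdPairs_mem ha).2
      have b1 := (pvOrdPairs_mem hb).1
      have b2 := (pvOrdPairs_mem hb).2
      rw [hidx a1, hidx a2, hidx b1, hidx b2]
      push_cast
      nlinarith [hab]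
    · -- across: (x, a) before any pair from the tail
      intro a ha b hb
      simp only [List.mem_map] at ha
      obtain ⟨y, hy, rfl⟩ := ha
      have b1 := (pvOrdPairs_mem hb).1
      have b2 := (pvOrdPairs_mem hb).2
      simp only [List.idxOf_cons_self, hidx hy, hidx b1, hidx b2]
      have h1 : t.idxOf y < t.length := List.idxOf_lt_length_iff.mpr hy
      have h2 : (0:Int) ≤ (t.idxOf b.1 : Int) := by positivity
      have h3 : (0:Int) ≤ (t.idxOf b.2 : Int) := by positivity
      push_cast
      nlinarith
theorem pvLookup : ∀ (dm : List (String × List String)), (pvKeysL dm).Nodup →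
    ∀ {g : String} {ps : List String}, (g, ps) ∈ dm → pvS dm g = ps
  | [], _, _, _, h => by simp at h
  | gp :: rest, h, g, ps, hm => by
    have h' : (gp.1 :: pvKeysL rest).Nodup := h
    obtain ⟨hx, ht⟩ := List.nodup_cons.mp h'
    rcases List.mem_cons.mp hm with e | e
    · have : gp = (g, ps) := e.symm
      subst this
      show ((PySem.Dict.mk ((g, ps) :: rest)).get? g).getD [] = ps
      rw [PySem.Dict.get?_mk_cons]
      simp
    · have hg : g ∈ pvKeysL rest := by
        simp only [pvKeysL, List.mem_map]
        exact ⟨(g, ps), e, rfl⟩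
      have hne : ¬(gp.1 == g) := by
        simp only [beq_iff_eq]
        intro he
        exact hx (he ▸ hg)
      show ((PySem.Dict.mk (gp :: rest)).get? g).getD [] = ps
      have heq : (PySem.Dict.mk (gp :: rest)).get? g = (PySem.Dict.mk rest).get? g := by
        rw [show gp = (gp.1, gp.2) from rfl, PySem.Dict.get?_mk_cons]
        simp [hne]
      rw [heq]
      exact pvLookup rest ht e

theorem pvMem_keys : ∀ (dm : List (String × List String)) {g : String},
    g ∈ pvKeysL dm → ∃ ps, (g, ps) ∈ dm := by
  intro dm g hg
  simp only [pvKeysL, List.mem_map] at hg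
  obtain ⟨gp, hgp, e⟩ := hg
  exact ⟨gp.2, by rwa [show (g, gp.2) = gp from by rw [← e]]⟩

theorem pvFilter_beq_of_nodup (p : String) : ∀ (l : List String), l.Nodup →
    l.filter (fun q => q == p) = if p ∈ l then [p] else []
  | [], _ => by simp
  | x :: t, h => by
    obtain ⟨hx, ht⟩ := List.nodup_cons.mp h
    rw [List.filter_cons, pvFilter_beq_of_nodup p t ht]
    by_cases e : x = p
    · subst e
      simp [hx]
    · have hbe : (x == p) = false := by simpa using e
      rw [hbe]
      simp only [Bool.false_eq_true, if_false]
      apply if_congr _ rfl rfl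
      constructor
      · exact List.mem_cons_of_mem _
      · intro hh
        rcases List.mem_cons.mp hh with h1 | h1
        · exact absurd h1.symm e
        · exact h1

theorem pvGames_eq : ∀ (dm : List (String × List String)), (∀ gp ∈ dm, gp.2.Nodup) → ∀ (p : String),
    pvGames dm p = (dm.filter (fun gp => decide (p ∈ gp.2))).map (·.1)
  | [], _, p => rfl
  | gp :: rest, h2, p => by
    have hh := h2 gp (by simp)
    have ih := pvGames_eq rest (fun q hq => h2 q (List.mem_cons_of_mem _ hq)) p
    unfold pvGames pvPL at ih ⊢
    rw [List.flatMap_cons, List.filter_append, List.map_append, ih, List.filter_cons]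
    rw [List.filter_map]
    have hcomp : ((fun q => q.1 == p) ∘ fun pl => (pl, gp.1)) = (fun q => q == p) := rfl
    rw [hcomp, pvFilter_beq_of_nodup p gp.2 hh]
    by_cases hp : p ∈ gp.2 <;> simp [hp]
theorem pvMem_games (dm : List (String × List String)) (h1 : (pvKeysL dm).Nodup)
    (h2 : ∀ gp ∈ dm, gp.2.Nodup) (p g : String) :
    g ∈ pvGames dm p ↔ g ∈ pvKeysL dm ∧ p ∈ pvS dm g := by
  rw [pvGames_eq dm h2 p]
  simp only [List.mem_map, List.mem_filter]
  constructor
  · rintro ⟨gp, ⟨hgp, hp⟩, rfl⟩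
    refine ⟨List.mem_map.mpr ⟨gp, hgp, rfl⟩, ?_⟩
    rw [pvLookup dm h1 (show (gp.1, gp.2) ∈ dm from hgp)]
    simpa using hp
  · rintro ⟨hg, hp⟩
    obtain ⟨ps, hps⟩ := pvMem_keys dm hg
    refine ⟨(g, ps), ⟨hps, ?_⟩, rfl⟩
    rw [pvLookup dm h1 hps] at hp
    simpa using hp

theorem pvGames_sublist (dm : List (String × List String)) (h2 : ∀ gp ∈ dm, gp.2.Nodup) (p : String) :
    (pvGames dm p).Sublist (pvKeysL dm) := by
  rw [pvGames_eq dm h2 p]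
  exact (List.filter_sublist (l := dm)).map (·.1)

theorem pvMem_players (dm : List (String × List String)) {p g : String}
    (h1 : (pvKeysL dm).Nodup) (hg : g ∈ pvKeysL dm) (hp : p ∈ pvS dm g) : p ∈ pvPlayers dm := by
  obtain ⟨ps, hps⟩ := pvMem_keys dm hg
  have := pvLookup dm h1 hps
  rw [this] at hp
  unfold pvPlayers
  rw [PySem.Set.mem_ofList]
  simp only [List.mem_map, pvPL, List.mem_flatMap]
  exact ⟨(p, g), ⟨(g, ps), hps, ⟨p, hp, rfl⟩⟩, rfl⟩

theorem pvS_nodup (dm : List (String × List String)) (h1 : (pvKeysL dm).Nodup)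
    (h2 : ∀ gp ∈ dm, gp.2.Nodup) (g : String) : (pvS dm g).Nodup := by
  by_cases hg : g ∈ pvKeysL dm
  · obtain ⟨ps, hps⟩ := pvMem_keys dm hg
    rw [pvLookup dm h1 hps]
    exact h2 (g, ps) hps
  · have : pvS dm g = [] := by
      unfold pvS PySem.Dict.getD
      have : (PySem.Dict.mk dm).get? g = none := by
        unfold PySem.Dict.get?
        rw [Option.map_eq_none_iff, List.find?_eq_none]
        intro gp hgp
        simp only [beq_iff_eq]
        intro e
        exact hg (List.mem_map.mpr ⟨gp, hgp, e⟩)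
      rw [this]
      rfl
    rw [this]
    exact List.nodup_nil
theorem pvCount_flatMap {α β : Type} [BEq β] [LawfulBEq β] (g : α → List β) (k : β) :
    ∀ l : List α, ((l.flatMap g).count k) = (l.map (fun x => (g x).count k)).sum
  | [] => rfl
  | x :: t => by
    simp only [List.flatMap_cons, List.count_append, List.map_cons, List.sum_cons,
      pvCount_flatMap g k t]

theorem pvSum_indicator {α : Type} (P : α → Prop) [DecidablePred P] :
    ∀ l : List α, (l.map (fun x => if P x then 1 else 0)).sum = l.countP (fun x => decide (P x))
  | [] => rfl
  | x :: t => by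
    simp only [List.map_cons, List.sum_cons, List.countP_cons, pvSum_indicator P t]
    by_cases h : P x <;> simp [h] <;> omega

theorem pvTerm_count (dm : List (String × List String)) (h1 : (pvKeysL dm).Nodup)
    (h2 : ∀ gp ∈ dm, gp.2.Nodup) {k : String × String} (hk : k ∈ pvOrdPairs (pvKeysL dm))
    (p : String) :
    (pvOrdPairs (pvGames dm p)).count k = if p ∈ pvS dm k.1 ∧ p ∈ pvS dm k.2 then 1 else 0 := by
  have hsub := pvGames_sublist dm h2 p
  have hGnd : (pvGames dm p).Nodup := hsub.nodup h1
  have hk1 : k.1 ∈ pvKeysL dm := (pvOrdPairs_mem hk).1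
  have hk2 : k.2 ∈ pvKeysL dm := (pvOrdPairs_mem hk).2
  by_cases hmem : p ∈ pvS dm k.1 ∧ p ∈ pvS dm k.2
  · rw [if_pos hmem]
    have hin : k ∈ pvOrdPairs (pvGames dm p) := by
      rw [pvOrdPairs_sublist_iff hsub h1]
      exact ⟨hk, (pvMem_games dm h1 h2 p k.1).mpr ⟨hk1, hmem.1⟩,
        (pvMem_games dm h1 h2 p k.2).mpr ⟨hk2, hmem.2⟩⟩
    exact List.count_eq_one_of_mem (pvOrdPairs_nodup hGnd) hin
  · rw [if_neg hmem]
    apply List.count_eq_zero_of_not_mem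
    intro hin
    rw [pvOrdPairs_sublist_iff hsub h1] at hin
    exact hmem ⟨((pvMem_games dm h1 h2 p k.1).mp hin.2.1).2,
      ((pvMem_games dm h1 h2 p k.2).mp hin.2.2).2⟩

theorem pvShared_eq_filter (dm : List (String × List String)) (k : String × String) :
    pvShared dm k = (((pvS dm k.1).filter (fun x => (pvS dm k.2).contains x)).length : Int) := rfl

theorem pvCount_L (dm : List (String × List String)) (h1 : (pvKeysL dm).Nodup)
    (h2 : ∀ gp ∈ dm, gp.2.Nodup) {k : String × String} (hk : k ∈ pvOrdPairs (pvKeysL dm)) :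
    ((pvL dm).count k : Int) = pvShared dm k := by
  have hk1 : k.1 ∈ pvKeysL dm := (pvOrdPairs_mem hk).1
  unfold pvL
  rw [pvCount_flatMap]
  have hterm : (pvPlayers dm).map (fun p => (pvOrdPairs (pvGames dm p)).count k)
      = (pvPlayers dm).map (fun p => if p ∈ pvS dm k.1 ∧ p ∈ pvS dm k.2 then 1 else 0) := by
    apply List.map_congr_left
    intro p _
    exact pvTerm_count dm h1 h2 hk p
  rw [hterm, pvSum_indicator, pvShared_eq_filter, List.countP_eq_length_filter]
  congr 1
  have hnd1 : ((pvPlayers dm).filter (fun p => decide (p ∈ pvS dm k.1 ∧ p ∈ pvS dm k.2))).Nodup :=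
    (PySem.Set.nodup_ofList _).filter _
  have hnd2 : (((pvS dm k.1)).filter (fun x => (pvS dm k.2).contains x)).Nodup :=
    (pvS_nodup dm h1 h2 k.1).filter _
  apply List.Perm.length_eq
  rw [List.perm_ext_iff_of_nodup hnd1 hnd2]
  intro q
  simp only [List.mem_filter, decide_eq_true_eq, List.contains_eq_mem]
  constructor
  · rintro ⟨_, hq1, hq2⟩
    exact ⟨hq1, by simpa using hq2⟩
  · rintro ⟨hq1, hq2⟩
    exact ⟨pvMem_players dm h1 hk1 hq1, hq1, by simpa using hq2⟩

theorem pvMem_L (dm : List (String × List String)) (h1 : (pvKeysL dm).Nodup)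
    (h2 : ∀ gp ∈ dm, gp.2.Nodup) (k : String × String) :
    k ∈ pvL dm ↔ k ∈ pvOrdPairs (pvKeysL dm) ∧ pvShared dm k ≠ 0 := by
  constructor
  · intro hin
    obtain ⟨p, hp, hkp⟩ := List.mem_flatMap.mp hin
    have hsub := pvGames_sublist dm h2 p
    have hiff := (pvOrdPairs_sublist_iff hsub h1).mp hkp
    have hkk := hiff.1
    refine ⟨hkk, ?_⟩
    have hc := pvCount_L dm h1 h2 hkk
    have : 0 < (pvL dm).count k := List.count_pos_iff.mpr hin
    omega
  · rintro ⟨hkk, hs⟩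
    have hc := pvCount_L dm h1 h2 hkk
    have : 0 < (pvL dm).count k := by omega
    exact List.count_pos_iff.mp this
theorem pvPortB_eq (dm : List (String × List String)) (h1 : (pvKeysL dm).Nodup)
    (h2 : ∀ gp ∈ dm, gp.2.Nodup) :
    build_conflict_matrix_alt dm
    = ((pvYs dm).foldl (pvEmit2 dm) PySem.Dict.empty).items.map (fun p => (p.1.1, p.1.2, p.2)) := by
  simp only [build_conflict_matrix_alt]
  rw [pvPG_values dm, pvCounts_eq dm, PySem.Dict.keys_counter]
  set posD := List.foldl (fun d ig => d.insert ig.2 ig.1) (PySem.Dict.empty : PySem.Dict String Int)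
      (PySem.List.enumerate (List.map (fun x => x.1) dm)) with hposD
  have hnodupYs : (pvYs dm).Nodup := (pvOrdPairs_nodup h1).filter _
  have hmemYs : ∀ q, q ∈ pvYs dm ↔ q ∈ pvOrdPairs (pvKeysL dm) ∧ pvShared dm q ≠ 0 := by
    intro q; simp [pvYs, List.mem_filter]
  have hperm : (pvYs dm).Perm (PySem.Set.ofList (pvL dm)) := by
    rw [List.perm_ext_iff_of_nodup hnodupYs (PySem.Set.nodup_ofList _)]
    intro q
    rw [hmemYs, PySem.Set.mem_ofList, pvMem_L dm h1 h2]
  have hgetD : ∀ g, g ∈ pvKeysL dm → posD.getD g 0 = ((pvKeysL dm).idxOf g : Int) := by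
    intro g hg
    have key := pvPos_getD g (pvKeysL dm) 0 PySem.Dict.empty h1
    simp only [pvKeysL] at key
    rw [hposD, key]
    have hg' : g ∈ dm.map (fun x => x.1) := hg
    rw [if_pos hg', zero_add]
    rfl
  have hsize : ((posD.size : Nat) : Int) = ((pvKeysL dm).length : Int) := by
    exact_mod_cast congrArg Nat.cast (pvPos_size dm h1)
  have hpair : (pvYs dm).Pairwise (fun a b =>
      posD.getD a.1 0 * (posD.size : Int) + posD.getD a.2 0
      < posD.getD b.1 0 * (posD.size : Int) + posD.getD b.2 0) := by
    have hp0 := pvOrdPairs_pairwise (pvKeysL dm) h1 ((posD.size : Nat) : Int) (le_of_eq hsize.symm)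
    have hsubl : (pvYs dm).Sublist (pvOrdPairs (pvKeysL dm)) := List.filter_sublist
    have hp1 := hp0.sublist hsubl
    apply hp1.imp_of_mem
    intro a b ha hb hab
    have ha' := ((hmemYs a).mp ha).1
    have hb' := ((hmemYs b).mp hb).1
    rw [hgetD a.1 (pvOrdPairs_mem ha').1, hgetD a.2 (pvOrdPairs_mem ha').2,
        hgetD b.1 (pvOrdPairs_mem hb').1, hgetD b.2 (pvOrdPairs_mem hb').2]
    exact hab
  have hsorted := PySem.List.sorted_eq_of_perm_of_pairwise_lt (PySem.Set.ofList (pvL dm)) (pvYs dm)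
    (fun k => posD.getD k.1 0 * (posD.size : Int) + posD.getD k.2 0) hperm hpair
  rw [hsorted]
  have hfc : List.foldl (fun conf k =>
      (conf.insert k ((PySem.Dict.counter (pvL dm)).getD k 0)).insert (k.2, k.1)
        ((PySem.Dict.counter (pvL dm)).getD k 0)) PySem.Dict.empty (pvYs dm)
      = List.foldl (pvEmit2 dm) PySem.Dict.empty (pvYs dm) := by
    apply PySem.List.foldl_congr_mem
    intro acc k hk
    have hkk := ((hmemYs k).mp hk).1
    have : (PySem.Dict.counter (pvL dm)).getD k 0 = pvShared dm k := by
      rw [PySem.Dict.getD_counter, pvCount_L dm h1 h2 hkk]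
    rw [this]
    rfl
  rw [hfc]

-- ===== VERDICT (by name: the statement is the Claim_ definition above) =====
theorem build_conflict_matrix_spec : Claim_equal_build_conflict_matrix := by
  intro dm _ hpre
  unfold Spec_build_conflict_matrix
  rw [pvPortA_eq, pvPortB_eq dm hpre.1 hpre.2]
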